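-- pv_equiv track=rewrite | github.com/Mugamta/Boostcamp_AITech5_CV11 | 2024/08.03/박수영_백준_27277_장기자랑.py | solution
-- ===== SOURCE A (Python) =====
-- from collections import deque
--
-- def solution(n, arr):
--     """
--     goal: 적절한 순서로 n명의 병사들을 배치했을 때, 각 병사가 발휘할 수 있는 실력의 합의 최댓값 구하기
--     note:
--         - 실력 발휘를 최대로 하기 위해선, a_{i} - a{i-1}이 크게 병사들을 배치하면 됨
--         - reference: https://dinae.tistory.com/85
--         - 문제 풀이에 필요한 핵심 아이디어는 떠올렸으나, 이것이 모든 경우의 수를 처리할 수 있는지 확신이 서지 않았음.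
--     """
--     # 오름차순으로 정렬
--     arr.sort()
--     arr = deque(arr)
--
--     # arr에 남은 수 중에서 가장 큰 수, 가장 작은 수 순서대로 pop하여 tmp에 추가(병사를 배치하는 과정)
--     tmp = []
--     cnt, lim = 1, len(arr)
--     while cnt <= lim:
--         if (cnt % 2) == 1:
--             tmp.append(arr.pop())
--         else:
--             tmp.append(arr.popleft())
--
--         cnt += 1
--
--     # 실력의 합 계산
--     answer = 0
--     for i in range(lim):
--         if i == 0:
--             answer += tmp[i]
--             continue
--
--         answer += max(0, tmp[i] - tmp[i-1])
--
--     return answer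
-- ===== SOURCE B (Python) =====
-- def solution(n, arr):
--     # Sort in place (same observable mutation as A), then closed-form pairing:
--     # answer = max element plus, for each m, (the (m+1)-th largest minus the m-th smallest).
--     arr.sort()
--     k = len(arr)
--     if k == 0:
--         return 0
--     ans = arr[-1]
--     for m in range((k - 1) // 2):
--         ans += arr[k - 2 - m] - arr[m]
--     return ans
-- ===== Notes on version B (the rewrite author's own statement) =====
-- stated objective: simpler
-- what changed: Replaces the deque simulation (build the alternating max/min arrangement, then sum clamped consecutive differences) with a direct closed-form pass over the sorted array pairing the m-th smallest with the (m+1)-th largest.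
import Mathlib
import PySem

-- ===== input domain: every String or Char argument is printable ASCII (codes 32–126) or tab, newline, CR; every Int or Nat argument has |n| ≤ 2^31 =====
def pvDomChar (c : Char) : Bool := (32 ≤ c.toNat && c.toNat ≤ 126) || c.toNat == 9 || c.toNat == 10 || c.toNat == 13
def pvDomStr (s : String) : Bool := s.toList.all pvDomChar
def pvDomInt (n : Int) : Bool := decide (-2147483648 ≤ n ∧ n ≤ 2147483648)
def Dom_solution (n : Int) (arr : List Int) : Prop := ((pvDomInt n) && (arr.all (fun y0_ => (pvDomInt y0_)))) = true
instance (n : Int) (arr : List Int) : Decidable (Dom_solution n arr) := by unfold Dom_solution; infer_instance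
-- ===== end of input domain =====

-- B replaces A's deque simulation by a closed-form pass over the sorted array (objective: simpler).
-- Both Pythons sort arr in place; the equivalence proved here is about the return value
-- (the in-place mutation is identical in A and B anyway).

-- ===== PORT A =====
-- the while loop: cnt counts 1..lim; odd cnt pops from the back (arr.pop()), even from the
-- front (arr.popleft()). Exactly lim = |dq| pops happen, so the deque is never empty when
-- popped; getLast!/head! are therefore exact here (Python would raise only on an empty pop).
def solutionLoop (cnt lim : Nat) (dq tmp : List Int) : List Int :=
  if _h : cnt ≤ lim then
    if cnt % 2 = 1 then
      solutionLoop (cnt + 1) lim dq.dropLast (tmp ++ [dq.getLast!])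
    else
      solutionLoop (cnt + 1) lim dq.tail (tmp ++ [dq.head!])
  else tmp
termination_by lim + 1 - cnt
decreasing_by all_goals omega

-- the sum loop: for i in range(lim), i == 0 adds tmp[0], otherwise max(0, tmp[i]-tmp[i-1]);
-- all indices are in range (lim = len(tmp)), so getD is exact.
def solutionSum (tmp : List Int) (lim : Nat) : Int :=
  (List.range lim).foldl
    (fun ans i =>
      if i = 0 then ans + tmp.getD i 0
      else ans + max 0 (tmp.getD i 0 - tmp.getD (i - 1) 0)) 0

def solution (n : Int) (arr : List Int) : Int :=
  let arr := PySem.List.sorted arr (fun x => x) false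
  let lim := arr.length
  let tmp := solutionLoop 1 lim arr []
  solutionSum tmp lim

-- ===== PORT B =====
-- the body of Source B after the in-place sort: arr[-1] plus the paired differences;
-- all indices used are nonnegative and in range, so getLast!/getD are exact.
def solutionAltCore (arr : List Int) : Int :=
  let k := arr.length
  if k = 0 then 0
  else
    (List.range ((k - 1) / 2)).foldl
      (fun ans m => ans + (arr.getD (k - 2 - m) 0 - arr.getD m 0)) arr.getLast!

def solution_alt (n : Int) (arr : List Int) : Int :=
  solutionAltCore (PySem.List.sorted arr (fun x => x) false)

-- ===== PRECONDITION & SPEC =====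
def Spec_solution (n : Int) (arr : List Int) (out : Int) : Prop := out = solution_alt n arr
instance (n : Int) (arr : List Int) (out : Int) : Decidable (Spec_solution n arr out) := by unfold Spec_solution; infer_instance

-- ===== CLAIM (what is proved, stated in full; the proofs are below) =====
def Claim_equal_solution : Prop := ∀ (n : Int) (arr : List Int), Dom_solution n arr → Spec_solution n arr (solution n arr)

-- ===== LEMMAS AND PROOFS =====

-- sum of clamped consecutive differences, structurally
def pairSum (prev : Int) : List Int → Int
  | [] => 0
  | x :: xs => max 0 (x - prev) + pairSum x xs

theorem solutionLoop_acc : ∀ (fuel cnt lim : Nat) (dq t : List Int), lim + 1 - cnt ≤ fuel →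
    solutionLoop cnt lim dq t = t ++ solutionLoop cnt lim dq [] := by
  intro fuel
  induction fuel with
  | zero =>
    intro cnt lim dq t h
    conv_lhs => rw [solutionLoop]
    conv_rhs => rw [solutionLoop]
    simp only [dif_neg (by omega : ¬ cnt ≤ lim)]
    simp
  | succ f ih =>
    intro cnt lim dq t h
    conv_lhs => rw [solutionLoop]
    conv_rhs => rw [solutionLoop]
    by_cases hc : cnt ≤ lim
    · simp only [dif_pos hc]
      by_cases hp : cnt % 2 = 1
      · simp only [if_pos hp]
        rw [ih (cnt + 1) lim dq.dropLast (t ++ [dq.getLast!]) (by omega),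
            ih (cnt + 1) lim dq.dropLast ([] ++ [dq.getLast!]) (by omega)]
        simp
      · simp only [if_neg hp]
        rw [ih (cnt + 1) lim dq.tail (t ++ [dq.head!]) (by omega),
            ih (cnt + 1) lim dq.tail ([] ++ [dq.head!]) (by omega)]
        simp
    · simp only [dif_neg hc]; simp

theorem solutionLoop_shift : ∀ (fuel cnt lim : Nat) (dq t : List Int), lim + 1 - cnt ≤ fuel →
    solutionLoop (cnt + 2) (lim + 2) dq t = solutionLoop cnt lim dq t := by
  intro fuel
  induction fuel with
  | zero =>
    intro cnt lim dq t h
    conv_lhs => rw [solutionLoop]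
    conv_rhs => rw [solutionLoop]
    simp only [dif_neg (by omega : ¬ cnt ≤ lim), dif_neg (by omega : ¬ cnt + 2 ≤ lim + 2)]
  | succ f ih =>
    intro cnt lim dq t h
    conv_lhs => rw [solutionLoop]
    conv_rhs => rw [solutionLoop]
    by_cases hc : cnt ≤ lim
    · simp only [dif_pos hc, dif_pos (by omega : cnt + 2 ≤ lim + 2)]
      have hp : (cnt + 2) % 2 = cnt % 2 := by omega
      rw [hp]
      by_cases hp1 : cnt % 2 = 1
      · simp only [if_pos hp1]
        exact ih (cnt + 1) lim dq.dropLast (t ++ [dq.getLast!]) (by omega)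
      · simp only [if_neg hp1]
        exact ih (cnt + 1) lim dq.tail (t ++ [dq.head!]) (by omega)
    · simp only [dif_neg hc, dif_neg (by omega : ¬ cnt + 2 ≤ lim + 2)]

theorem solutionLoop_length : ∀ (fuel cnt lim : Nat) (dq t : List Int), lim + 1 - cnt ≤ fuel →
    (solutionLoop cnt lim dq t).length = t.length + (lim + 1 - cnt) := by
  intro fuel
  induction fuel with
  | zero =>
    intro cnt lim dq t h
    conv_lhs => rw [solutionLoop]
    simp only [dif_neg (by omega : ¬ cnt ≤ lim)]
    omega
  | succ f ih =>
    intro cnt lim dq t h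
    conv_lhs => rw [solutionLoop]
    by_cases hc : cnt ≤ lim
    · simp only [dif_pos hc]
      by_cases hp : cnt % 2 = 1
      · simp only [if_pos hp]
        rw [ih (cnt + 1) lim dq.dropLast (t ++ [dq.getLast!]) (by omega)]
        simp; omega
      · simp only [if_neg hp]
        rw [ih (cnt + 1) lim dq.tail (t ++ [dq.head!]) (by omega)]
        simp; omega
    · simp only [dif_neg hc]; omega

-- first element produced by the loop is the back of the deque (one unfolding)
theorem solutionLoop_cons (lim : Nat) (dq : List Int) (h : 1 ≤ lim) :
    solutionLoop 1 lim dq [] = dq.getLast! :: solutionLoop 2 lim dq.dropLast [] := by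
  conv_lhs => rw [solutionLoop]
  simp only [dif_pos h, Nat.reduceMod, reduceIte, List.nil_append]
  exact solutionLoop_acc (lim + 1) 2 lim dq.dropLast [dq.getLast!] (by omega)

theorem head!_dropLast (s : List Int) (h : 2 ≤ s.length) : s.dropLast.head! = s.head! := by
  match s, h with
  | a :: b :: t, _ => simp

-- two unfoldings plus the shift: the arrangement of a list of length ≥ 2 starts
-- max :: min followed by the arrangement of the middle
theorem solutionLoop_two (s : List Int) (h2 : 2 ≤ s.length) :
    solutionLoop 1 s.length s [] =
      s.getLast! :: s.head! :: solutionLoop 1 (s.length - 2) s.dropLast.tail [] := by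
  conv_lhs => rw [solutionLoop]
  simp only [dif_pos (by omega : 1 ≤ s.length), Nat.reduceMod, reduceIte, List.nil_append]
  conv_lhs => rw [solutionLoop]
  simp only [dif_pos h2, Nat.reduceAdd, Nat.reduceMod]
  rw [head!_dropLast s h2]
  have hl : s.length = (s.length - 2) + 2 := by omega
  rw [show (3 : Nat) = 1 + 2 from rfl]
  conv_lhs => rw [hl]
  rw [solutionLoop_shift (s.length + 1) 1 (s.length - 2) s.dropLast.tail _ (by omega)]
  rw [solutionLoop_acc (s.length + 1) 1 (s.length - 2) s.dropLast.tail _ (by omega)]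
  simp

-- the index sum loop equals pairSum
theorem sum_bridge : ∀ (xs : List Int) (prev c : Int),
    (List.range xs.length).foldl
      (fun a j => a + max 0 (xs.getD j 0 - (prev :: xs).getD j 0)) c = c + pairSum prev xs := by
  intro xs
  induction xs with
  | nil => intro prev c; simp [pairSum]
  | cons x xs ih =>
    intro prev c
    simp only [List.length_cons]
    rw [List.range_succ_eq_map]
    simp only [List.foldl_cons, List.foldl_map, List.getD_cons_zero, List.getD_cons_succ]
    rw [ih x (c + max 0 (x - prev))]
    simp [pairSum]; ring

theorem solutionSum_cons (t0 : Int) (rest : List Int) :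
    solutionSum (t0 :: rest) (rest.length + 1) = t0 + pairSum t0 rest := by
  rw [solutionSum, List.range_succ_eq_map]
  simp only [List.foldl_cons, List.foldl_map, List.getD_cons_zero, List.getD_cons_succ,
    Nat.succ_ne_zero, if_false, Nat.succ_sub_one, if_pos]
  rw [sum_bridge rest t0 (0 + t0)]
  simp

-- A's value on an (already sorted) list, as a function
def aCore (s : List Int) : Int := solutionSum (solutionLoop 1 s.length s []) s.length

theorem aCore_eq_pairSum (s : List Int) (h : 1 ≤ s.length) :
    aCore s = s.getLast! + pairSum s.getLast! (solutionLoop 2 s.length s.dropLast []) := by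
  rw [aCore, solutionLoop_cons s.length s h]
  set L := solutionLoop 2 s.length s.dropLast [] with hLdef
  have hlen : L.length = s.length - 1 := by
    rw [hLdef, solutionLoop_length (s.length + 1) 2 s.length s.dropLast [] (by omega)]
    simp
  rw [show s.length = L.length + 1 from by omega]
  exact solutionSum_cons s.getLast! L

-- getLast! as an index
theorem getLast!_eq_getD (s : List Int) (h : 1 ≤ s.length) :
    s.getLast! = s.getD (s.length - 1) 0 := by
  induction s with
  | nil => simp at h
  | cons a t ih =>
    cases t with
    | nil => simp
    | cons b u =>
      rw [show (a :: b :: u).getLast! = (b :: u).getLast! from by simp, ih (by simp)]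
      rw [show (a :: b :: u).length - 1 = ((b :: u).length - 1) + 1 from by simp,
        List.getD_cons_succ]

theorem getD_tail (s : List Int) (j : Nat) : s.tail.getD j 0 = s.getD (j + 1) 0 := by
  cases s <;> simp

theorem getD_dropLast (s : List Int) (j : Nat) (h : j < s.length - 1) :
    s.dropLast.getD j 0 = s.getD j 0 := by
  rw [List.getD_eq_getElem _ _ (by simp; omega), List.getD_eq_getElem _ _ (by omega)]
  exact List.getElem_dropLast ..

theorem getD_mid (s : List Int) (j : Nat) (h : j < s.length - 2) :
    s.dropLast.tail.getD j 0 = s.getD (j + 1) 0 := by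
  rw [getD_tail, getD_dropLast s (j + 1) (by omega)]

-- the fold of Source B's loop as a Finset sum
theorem foldl_range_add (g : Nat → Int) : ∀ (n : Nat) (c : Int),
    (List.range n).foldl (fun a m => a + g m) c = c + ∑ m ∈ Finset.range n, g m := by
  intro n
  induction n with
  | zero => intro c; simp
  | succ n ih =>
    intro c
    rw [List.range_succ, List.foldl_append, ih c, Finset.sum_range_succ]
    simp [add_assoc]

-- B's recursion: strip the largest and the smallest element
theorem bCore_rec (s : List Int) (h3 : 3 ≤ s.length) :
    solutionAltCore s = s.getLast! - s.head! + solutionAltCore s.dropLast.tail := by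
  have hmidlen : s.dropLast.tail.length = s.length - 2 := by simp; omega
  rw [solutionAltCore, solutionAltCore]
  simp only [hmidlen]
  rw [if_neg (by omega : ¬ s.length = 0), if_neg (by omega : ¬ s.length - 2 = 0)]
  rw [foldl_range_add, foldl_range_add]
  rw [show (s.length - 1) / 2 = (s.length - 3) / 2 + 1 from by omega, Finset.sum_range_succ']
  rw [show s.length - 2 - 1 = s.length - 3 from by omega]
  have hterm : ∀ m ∈ Finset.range ((s.length - 3) / 2),
      s.getD (s.length - 2 - (m + 1)) 0 - s.getD (m + 1) 0
      = s.dropLast.tail.getD (s.length - 2 - 2 - m) 0 - s.dropLast.tail.getD m 0 := by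
    intro m hm
    rw [Finset.mem_range] at hm
    rw [getD_mid s m (by omega), getD_mid s (s.length - 2 - 2 - m) (by omega),
      show s.length - 2 - 2 - m + 1 = s.length - 2 - (m + 1) from by omega]
  rw [Finset.sum_congr rfl hterm]
  have hlast : s.dropLast.tail.getLast! = s.getD (s.length - 2) 0 := by
    have h1 := getLast!_eq_getD s.dropLast.tail (by rw [hmidlen]; omega)
    rw [hmidlen] at h1
    have h2 := getD_mid s (s.length - 2 - 1) (by omega)
    rw [show s.length - 2 - 1 + 1 = s.length - 2 from by omega] at h2
    rw [h1, h2]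
  have hhead : s.head! = s.getD 0 0 := by
    match s, h3 with
    | a :: t, _ => simp
  rw [hlast, hhead]
  simp only [Nat.sub_zero]
  ring

theorem getLast!_mem (s : List Int) (h : 1 ≤ s.length) : s.getLast! ∈ s := by
  match s, h with
  | a :: t, _ => exact List.mem_of_getLast? rfl

-- A's recursion on a sorted list of length ≥ 3
theorem aCore_rec (s : List Int) (h3 : 3 ≤ s.length) (hs : s.Pairwise (· ≤ ·)) :
    aCore s = s.getLast! - s.head! + aCore s.dropLast.tail := by
  obtain ⟨a, b, t2, rfl⟩ : ∃ a b t2, s = a :: b :: t2 := by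
    match s, h3 with
    | x :: y :: t, _ => exact ⟨x, y, t, rfl⟩
  have hle : ∀ x ∈ b :: t2, a ≤ x := (List.pairwise_cons.mp hs).1
  set s := a :: b :: t2 with hsdef
  have hM : a ≤ s.getLast! := by
    have hmem := getLast!_mem s (by simp [hsdef])
    rcases List.mem_cons.mp hmem with h | h
    · omega
    · exact hle _ h
  -- tmp = M :: m :: (arrangement of the middle)
  rw [aCore, solutionLoop_two s (by simp [hsdef])]
  set L := solutionLoop 1 (s.length - 2) s.dropLast.tail [] with hL
  have hlen2 : L.length = s.length - 2 := by
    rw [hL, solutionLoop_length (s.length + 1) 1 (s.length - 2) s.dropLast.tail [] (by omega)]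
    simp
  rw [show s.length = (s.head! :: L).length + 1 from by
    simp only [List.length_cons, hlen2, hsdef]; omega]
  rw [solutionSum_cons, pairSum]
  rw [show s.head! = a from rfl]
  rw [max_eq_left (by omega : a - s.getLast! ≤ 0)]
  -- the middle: its arrangement starts with its own maximum
  have hmidlen : s.dropLast.tail.length = s.length - 2 := by simp; omega
  have hmid1 : 1 ≤ s.dropLast.tail.length := by
    rw [hmidlen]
    have h3' := h3
    simp only [hsdef, List.length_cons] at h3' ⊢
    omega
  have hloopmid : L = s.dropLast.tail.getLast! ::
      solutionLoop 2 s.dropLast.tail.length s.dropLast.tail.dropLast [] := by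
    rw [hL, ← hmidlen, solutionLoop_cons s.dropLast.tail.length s.dropLast.tail hmid1]
  rw [hloopmid, pairSum]
  -- a ≤ the middle's maximum (the middle's elements all lie in b :: t2)
  have hsub : s.dropLast.tail ⊆ b :: t2 := by
    rw [hsdef, show (a :: b :: t2).dropLast.tail = (b :: t2).dropLast from by
      cases t2 <;> simp]
    exact List.dropLast_subset _
  have hm2 : a ≤ s.dropLast.tail.getLast! := hle _ (hsub (getLast!_mem _ hmid1))
  rw [max_eq_right (by omega : 0 ≤ s.dropLast.tail.getLast! - a)]
  -- fold the middle's value back into aCore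
  rw [aCore_eq_pairSum s.dropLast.tail hmid1]
  ring

theorem core_eq : ∀ (k : Nat) (s : List Int), s.length = k → s.Pairwise (· ≤ ·) →
    aCore s = solutionAltCore s := by
  intro k
  induction k using Nat.strong_induction_on with
  | _ k ih =>
    intro s hlen hs
    match s, hs with
    | [], _ => simp [aCore, solutionAltCore, solutionSum, solutionLoop]
    | [a], _ => simp [aCore, solutionAltCore, solutionSum, solutionLoop, List.range_succ]
    | [a, b], hs =>
      have hab : a ≤ b := (List.pairwise_cons.mp hs).1 b (by simp)
      simp [aCore, solutionAltCore, solutionSum, solutionLoop, List.range_succ]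
      omega
    | (a :: b :: c :: rest), hs =>
      have h3 : 3 ≤ (a :: b :: c :: rest).length := by simp
      have hmid : (a :: b :: c :: rest).dropLast.tail.Pairwise (· ≤ ·) :=
        (hs.sublist (List.dropLast_sublist _)).sublist (List.tail_sublist _)
      rw [aCore_rec _ h3 hs, bCore_rec _ h3]
      have hlt : (a :: b :: c :: rest).dropLast.tail.length < k := by
        simp at hlen ⊢; omega
      rw [ih _ hlt _ rfl hmid]

-- ===== VERDICT (by name: the statement is the Claim_ definition above) =====
theorem solution_spec : Claim_equal_solution := by
  intro n arr _
  unfold Spec_solution solution solution_alt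
  have hp := PySem.List.sorted_pairwise arr (fun x => x) (κ := Int)
  exact core_eq _ (PySem.List.sorted arr (fun x => x) false) rfl hp
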